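-- pv_equiv track=rewrite | github.com/kriishukla/GeeksforGeekSolution | Medium/Count the number of possible triangles/count-the-number-of-possible-triangles.py | findNumberOfTriangles
-- ===== SOURCE A (Python) =====
-- def findNumberOfTriangles(arr, n):
--         #code here
--         arr.sort()
--         count = 0
--         for c in range(n-1, 1, -1):
--             a= 0
--             b = c-1
--             while  a< b :
--                 if arr[a]+ arr[b] > arr[c]:
--                     count += b-a
--                     b-=1
--                 else :
--                     a+=1
--
--         return count
-- ===== SOURCE B (Python) =====
-- def _lower_bound(a, x, lo, hi):
--     # first index in [lo, hi) whose value is >= x (hand-written bisect_left;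
--     # the module imports nothing, so no bisect import)
--     while lo < hi:
--         mid = (lo + hi) // 2
--         if a[mid] < x:
--             lo = mid + 1
--         else:
--             hi = mid
--     return lo
--
--
-- def findNumberOfTriangles(arr, n):
--     # sorts arr in place, like the original
--     arr.sort()
--     count = 0
--     for i in range(n - 2):
--         for j in range(i + 1, n - 1):
--             s = arr[i] + arr[j]
--             count += _lower_bound(arr, s, j + 1, n) - (j + 1)
--     return count
-- ===== Notes on version B (the rewrite author's own statement) =====
-- stated objective: alternative
-- what changed: Replaces A's per-apex two-pointer shrinking scan by a per-pair hand-written binary search (bisect_left with hi = n) that counts valid third sides directly.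
import Mathlib
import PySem

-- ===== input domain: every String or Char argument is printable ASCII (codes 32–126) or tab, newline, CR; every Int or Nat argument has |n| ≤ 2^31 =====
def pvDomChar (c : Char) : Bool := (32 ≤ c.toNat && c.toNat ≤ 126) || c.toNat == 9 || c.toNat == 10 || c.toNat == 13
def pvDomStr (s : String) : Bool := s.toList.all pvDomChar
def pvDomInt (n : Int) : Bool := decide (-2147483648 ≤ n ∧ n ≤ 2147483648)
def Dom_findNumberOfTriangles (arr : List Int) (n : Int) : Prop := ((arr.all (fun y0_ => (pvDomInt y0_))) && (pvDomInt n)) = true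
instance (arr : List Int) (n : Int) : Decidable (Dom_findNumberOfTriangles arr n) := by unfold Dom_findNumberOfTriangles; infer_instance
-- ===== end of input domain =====

-- B replaces A's per-apex two-pointer scan by a per-pair hand-written binary search
-- (lower bound) for the third side — a different decomposition of the same count
-- ("alternative", not claimed faster).  Both A and B sort `arr` in place; the
-- equivalence proved here is about the return value only (the mutation is identical).

-- ===== PORT A =====
-- termination measures for the ports' loops (cited by name in decreasing_by)
lemma pvDecShrink (a b : Int) (h : a < b) : (b - 1 - a).toNat < (b - a).toNat := by omega
lemma pvDecGrow (a b : Int) (h : a < b) : (b - (a + 1)).toNat < (b - a).toNat := by omega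
lemma pvDecMidUp (lo hi : Int) (h : lo < hi) :
    (hi - (PySem.Int.floordiv (lo + hi) 2 + 1)).toNat < (hi - lo).toNat := by
  have h2 : PySem.Int.floordiv (lo + hi) 2 = (lo + hi) / 2 :=
    PySem.Int.floordiv_eq_ediv_of_pos (by omega)
  omega
lemma pvDecMidDown (lo hi : Int) (h : lo < hi) :
    (PySem.Int.floordiv (lo + hi) 2 - lo).toNat < (hi - lo).toNat := by
  have h2 : PySem.Int.floordiv (lo + hi) 2 = (lo + hi) / 2 :=
    PySem.Int.floordiv_eq_ediv_of_pos (by omega)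
  omega

-- the inner `while a < b` loop of A
def pvTwoPtr (l : List Int) (t a b count : Int) : Int :=
  if _h : a < b then
    if PySem.List.pyGetD l a 0 + PySem.List.pyGetD l b 0 > t then
      pvTwoPtr l t a (b - 1) (count + (b - a))
    else
      pvTwoPtr l t (a + 1) b count
  else count
termination_by (b - a).toNat
decreasing_by
  · exact pvDecShrink a b _h
  · exact pvDecGrow a b _h

def findNumberOfTriangles (arr : List Int) (n : Int) : Int :=
  let l := PySem.List.sorted arr (fun x => x) false
  (PySem.List.pyRange (n - 1) 1 (-1)).foldl
    (fun count c => pvTwoPtr l (PySem.List.pyGetD l c 0) 0 (c - 1) count) 0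

-- ===== PORT B =====
-- Source B's hand-written bisect_left: first index in [lo, hi) whose value is ≥ x
def pvLowerBound (l : List Int) (x lo hi : Int) : Int :=
  if _h : lo < hi then
    let mid := PySem.Int.floordiv (lo + hi) 2
    if PySem.List.pyGetD l mid 0 < x then pvLowerBound l x (mid + 1) hi
    else pvLowerBound l x lo mid
  else lo
termination_by (hi - lo).toNat
decreasing_by
  · exact pvDecMidUp lo hi _h
  · exact pvDecMidDown lo hi _h

def findNumberOfTriangles_alt (arr : List Int) (n : Int) : Int :=
  let l := PySem.List.sorted arr (fun x => x) false
  (PySem.List.pyRange 0 (n - 2) 1).foldl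
    (fun count i =>
      (PySem.List.pyRange (i + 1) (n - 1) 1).foldl
        (fun count j =>
          count +
            (pvLowerBound l (PySem.List.pyGetD l i 0 + PySem.List.pyGetD l j 0) (j + 1) n
              - (j + 1)))
        count)
    0

-- ===== PRECONDITION & SPEC =====
-- Pre_ excludes exactly the inputs on which A raises IndexError: n ≥ 3 with
-- n > len(arr) (A's first apex iteration reads arr[n-1]).  For n ≤ 2 A returns 0
-- without indexing, and so does B; those inputs stay inside Pre_.
def Pre_findNumberOfTriangles (arr : List Int) (n : Int) : Prop :=
  n ≤ (arr.length : Int) ∨ n ≤ 2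
instance (arr : List Int) (n : Int) : Decidable (Pre_findNumberOfTriangles arr n) := by
  unfold Pre_findNumberOfTriangles; infer_instance

def pvWitness_findNumberOfTriangles : List Int × Int := ([3, 4, 5, 6], 4)

def Spec_findNumberOfTriangles (arr : List Int) (n : Int) (out : Int) : Prop :=
  out = findNumberOfTriangles_alt arr n
instance (arr : List Int) (n : Int) (out : Int) : Decidable (Spec_findNumberOfTriangles arr n out) := by
  unfold Spec_findNumberOfTriangles; infer_instance

-- ===== CLAIM (what is proved, stated in full; the proofs are below) =====
def Claim_equal_findNumberOfTriangles : Prop :=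
  ∀ (arr : List Int) (n : Int), Dom_findNumberOfTriangles arr n →
    Pre_findNumberOfTriangles arr n →
    Spec_findNumberOfTriangles arr n (findNumberOfTriangles arr n)

-- ===== LEMMAS AND PROOFS =====

-- value at index i of the sorted list, as both ports read it
def pvVal (l : List Int) (i : Int) : Int := PySem.List.pyGetD l i 0

-- number of pairs a ≤ x < y ≤ b forming a triangle with apex value t
noncomputable def pvT (l : List Int) (t a b : Int) : Int :=
  ∑ y ∈ Finset.Ico a (b + 1), ∑ x ∈ Finset.Ico a y,
    (if t < pvVal l x + pvVal l y then (1 : Int) else 0)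

-- monotonicity of reads from a sorted list
lemma pvVal_mono (arr : List Int) (p q : Int) (h0 : 0 ≤ p) (hpq : p ≤ q)
    (hq : q < ((PySem.List.sorted arr (fun x => x) false).length : Int)) :
    pvVal (PySem.List.sorted arr (fun x => x) false) p ≤
      pvVal (PySem.List.sorted arr (fun x => x) false) q := by
  have hp : p < ((PySem.List.sorted arr (fun x => x) false).length : Int) := lt_of_le_of_lt hpq hq
  unfold pvVal
  rw [PySem.List.pyGetD_eq_getElem _ _ h0 hp,
      PySem.List.pyGetD_eq_getElem _ _ (le_trans h0 hpq) hq]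
  exact PySem.List.sorted_id_getElem_mono arr (by omega) (by omega)

-- Ico insert lemmas over ℤ
lemma pvIco_insert_left (a b : Int) (h : a < b) :
    Finset.Ico a b = insert a (Finset.Ico (a + 1) b) := by
  ext x; simp [Finset.mem_Ico, Finset.mem_insert]; omega

lemma pvIco_insert_top (a b : Int) (h : a ≤ b) :
    Finset.Ico a (b + 1) = insert b (Finset.Ico a b) := by
  ext x; simp [Finset.mem_Ico, Finset.mem_insert]; omega

lemma pvSum_Ico_succ_top {M : Type} [AddCommMonoid M] (a b : Int) (h : a ≤ b) (f : Int → M) :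
    (∑ x ∈ Finset.Ico a (b + 1), f x) = (∑ x ∈ Finset.Ico a b, f x) + f b := by
  rw [pvIco_insert_top a b h, Finset.sum_insert (by simp [Finset.mem_Ico])]
  exact add_comm _ _

-- split a ℤ-interval sum at an interior point
lemma pvSum_Ico_split {M : Type} [AddCommMonoid M] (f : Int → M) {m n k : Int}
    (h1 : m ≤ n) (h2 : n ≤ k) :
    (∑ i ∈ Finset.Ico m n, f i) + ∑ i ∈ Finset.Ico n k, f i = ∑ i ∈ Finset.Ico m k, f i := by
  rw [← Finset.sum_union (Finset.Ico_disjoint_Ico_consecutive m n k),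
      Finset.Ico_union_Ico_eq_Ico h1 h2]

-- the two-pointer loop counts exactly the triangle pairs in [a, b]
lemma pvTwoPtr_spec (arr : List Int) (t a b count : Int)
    (ha : 0 ≤ a) (hb : b < ((PySem.List.sorted arr (fun x => x) false).length : Int)) :
    pvTwoPtr (PySem.List.sorted arr (fun x => x) false) t a b count =
      count + pvT (PySem.List.sorted arr (fun x => x) false) t a b := by
  set l := PySem.List.sorted arr (fun x => x) false with hl
  have hlen : ((PySem.List.sorted arr (fun x => x) false).length : Int) = (l.length : Int) := rfl
  rw [pvTwoPtr]
  by_cases h : a < b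
  · simp only [h, dif_pos]
    by_cases hc : PySem.List.pyGetD l a 0 + PySem.List.pyGetD l b 0 > t
    · simp only [hc, if_pos]
      rw [pvTwoPtr_spec arr t a (b - 1) (count + (b - a)) ha (by omega), ← hl]
      have hsplit : pvT l t a b = pvT l t a (b - 1) + (b - a) := by
        unfold pvT
        rw [pvSum_Ico_succ_top a b (by omega)]
        have hone : ∀ x_ ∈ Finset.Ico a b,
            (if t < pvVal l x_ + pvVal l b then (1 : Int) else 0) = 1 := by
          intro x_ hx
          simp only [Finset.mem_Ico] at hx
          have hmono : pvVal l a ≤ pvVal l x_ :=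
            pvVal_mono arr a x_ ha (by omega) (by omega)
          have : t < pvVal l x_ + pvVal l b := by
            simp only [pvVal] at hmono ⊢; omega
          simp [this]
        rw [Finset.sum_congr rfl hone, Finset.sum_const, Int.card_Ico]
        have hcast : ((b - a).toNat : Int) = b - a := by omega
        simp only [nsmul_eq_mul, mul_one]
        rw [hcast, show b - 1 + 1 = b by omega]
      rw [hsplit]; abel
    · simp only [hc, if_neg, not_false_iff]
      rw [pvTwoPtr_spec arr t (a + 1) b count (by omega) hb, ← hl]
      have heq : pvT l t a b = pvT l t (a + 1) b := by
        unfold pvT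
        rw [pvIco_insert_left a (b + 1) (by omega),
            Finset.sum_insert (by simp [Finset.mem_Ico])]
        rw [Finset.Ico_eq_empty (a := a) (b := a) (by omega), Finset.sum_empty, zero_add]
        apply Finset.sum_congr rfl
        intro y hy
        simp only [Finset.mem_Ico] at hy
        rw [pvIco_insert_left a y (by omega),
            Finset.sum_insert (by simp [Finset.mem_Ico])]
        have hya : pvVal l y ≤ pvVal l b :=
          pvVal_mono arr y b (by omega) (by omega) (by omega)
        have hzero : ¬ t < pvVal l a + pvVal l y := by
          simp only [pvVal] at hya ⊢; omega
        simp [hzero]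
      rw [heq]
  · simp only [h, dif_neg, not_false_iff]
    have hz : pvT l t a b = 0 := by
      unfold pvT
      apply Finset.sum_eq_zero
      intro y hy
      simp only [Finset.mem_Ico] at hy
      rw [Finset.Ico_eq_empty (by omega), Finset.sum_empty]
    rw [hz, add_zero]
termination_by (b - a).toNat
decreasing_by all_goals omega

-- the binary search counts exactly the valid third sides in [lo, hi)
lemma pvLowerBound_spec (arr : List Int) (x lo hi : Int)
    (hlo : 0 ≤ lo) (hhi : hi ≤ ((PySem.List.sorted arr (fun x => x) false).length : Int)) :
    pvLowerBound (PySem.List.sorted arr (fun x => x) false) x lo hi =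
      lo + ∑ k ∈ Finset.Ico lo hi,
        (if pvVal (PySem.List.sorted arr (fun x => x) false) k < x then (1 : Int) else 0) := by
  set l := PySem.List.sorted arr (fun x => x) false with hl
  have hlen : ((PySem.List.sorted arr (fun x => x) false).length : Int) = (l.length : Int) := rfl
  rw [pvLowerBound]
  by_cases h : lo < hi
  · simp only [h, dif_pos]
    have hmid : PySem.Int.floordiv (lo + hi) 2 = (lo + hi) / 2 :=
      PySem.Int.floordiv_eq_ediv_of_pos (by omega)
    set mid := PySem.Int.floordiv (lo + hi) 2 with hm
    have hb1 : lo ≤ mid := by omega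
    have hb2 : mid < hi := by omega
    by_cases hc : PySem.List.pyGetD l mid 0 < x
    · simp only [hc, if_pos]
      rw [pvLowerBound_spec arr x (mid + 1) hi (by omega) hhi, ← hl]
      rw [← pvSum_Ico_split _ (show lo ≤ mid + 1 by omega) (show mid + 1 ≤ hi by omega)]
      have hone : ∀ k ∈ Finset.Ico lo (mid + 1),
          (if pvVal l k < x then (1 : Int) else 0) = 1 := by
        intro k hk
        simp only [Finset.mem_Ico] at hk
        have : pvVal l k ≤ pvVal l mid :=
          pvVal_mono arr k mid (by omega) (by omega) (by omega)
        have : pvVal l k < x := lt_of_le_of_lt this hc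
        simp [this]
      rw [Finset.sum_congr rfl hone, Finset.sum_const, Int.card_Ico]
      have hcast : ((mid + 1 - lo).toNat : Int) = mid + 1 - lo := by omega
      simp only [nsmul_eq_mul, mul_one]
      rw [hcast]; abel
    · simp only [hc, if_neg, not_false_iff]
      rw [pvLowerBound_spec arr x lo mid hlo (by omega), ← hl]
      rw [← pvSum_Ico_split _ (show lo ≤ mid by omega) (show mid ≤ hi by omega)]
      have hzero : ∀ k ∈ Finset.Ico mid hi,
          (if pvVal l k < x then (1 : Int) else 0) = 0 := by
        intro k hk
        simp only [Finset.mem_Ico] at hk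
        have : pvVal l mid ≤ pvVal l k :=
          pvVal_mono arr mid k (by omega) (by omega) (by omega)
        have : ¬ pvVal l k < x := by
          simp only [pvVal] at this ⊢; omega
        simp [this]
      rw [Finset.sum_congr rfl hzero]
      simp
  · simp only [h, dif_neg, not_false_iff]
    rw [Finset.Ico_eq_empty (by omega)]
    simp
termination_by (hi - lo).toNat
decreasing_by all_goals omega

-- additive folds are sums
lemma pvFoldl_add (L : List Int) (step : Int → Int → Int) (g : Int → Int)
    (hstep : ∀ acc c, c ∈ L → step acc c = acc + g c) :
    ∀ init, L.foldl step init = init + (L.map g).sum := by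
  induction L with
  | nil => simp
  | cons c L ih =>
      intro init
      simp only [List.foldl_cons, List.map_cons, List.sum_cons]
      rw [hstep init c (by simp), ih (fun acc c hc => hstep acc c (by simp [hc]))]
      abel

-- a list sum over pyRange is a Finset sum over Ico
lemma pvSum_pyRange (g : Int → Int) (a b : Int) :
    ((PySem.List.pyRange a b 1).map g).sum = ∑ x ∈ Finset.Ico a b, g x := by
  by_cases h : b ≤ a
  · rw [PySem.List.pyRange_one_eq_nil h, Finset.Ico_eq_empty (by omega)]; simp
  · have hk : (b - (a + 1)).toNat < (b - a).toNat := by omega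
    rw [PySem.List.pyRange_one_cons (by omega), pvIco_insert_left a b (by omega),
        Finset.sum_insert (by simp [Finset.mem_Ico]), List.map_cons, List.sum_cons,
        pvSum_pyRange g (a + 1) b]
termination_by (b - a).toNat
decreasing_by omega

-- triangle swap for ℤ intervals
lemma pvSum_tri_comm (a b : Int) (f : Int → Int → Int) :
    (∑ c ∈ Finset.Ico a b, ∑ y ∈ Finset.Ico a c, f y c) =
      ∑ y ∈ Finset.Ico a b, ∑ c ∈ Finset.Ico (y + 1) b, f y c := by
  by_cases h : b ≤ a
  · rw [Finset.Ico_eq_empty (by omega)]; simp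
  · have hb : a ≤ b - 1 := by omega
    have hsplit : Finset.Ico a b = Finset.Ico a (b - 1) ∪ {b - 1} := by
      ext x; simp [Finset.mem_Ico]; omega
    have hdisj : Disjoint (Finset.Ico a (b - 1)) ({b - 1} : Finset Int) := by
      simp [Finset.disjoint_singleton_right, Finset.mem_Ico]
    rw [hsplit, Finset.sum_union hdisj, Finset.sum_union hdisj,
        pvSum_tri_comm a (b - 1) f]
    simp only [Finset.sum_singleton]
    rw [Finset.Ico_eq_empty (a := b - 1 + 1) (b := b) (by omega)]
    have hstep : ∀ y ∈ Finset.Ico a (b - 1),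
        (∑ c ∈ Finset.Ico (y + 1) b, f y c) =
          (∑ c ∈ Finset.Ico (y + 1) (b - 1), f y c) + f y (b - 1) := by
      intro y hy
      simp only [Finset.mem_Ico] at hy
      have := pvSum_Ico_succ_top (y + 1) (b - 1) (by omega) (f y)
      simpa [show b - 1 + 1 = b by omega] using this
    rw [Finset.sum_congr rfl hstep, Finset.sum_add_distrib]
    simp only [Finset.sum_empty, add_zero]
termination_by (b - a).toNat
decreasing_by omega

-- degenerate apex intervals contain no pairs
lemma pvT_eq_zero (l : List Int) (t a b : Int) (h : b ≤ a) : pvT l t a b = 0 := by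
  unfold pvT
  apply Finset.sum_eq_zero
  intro y hy
  simp only [Finset.mem_Ico] at hy
  rw [Finset.Ico_eq_empty (by omega), Finset.sum_empty]

-- ===== VERDICT (by name: the statement is the Claim_ definition above) =====
theorem findNumberOfTriangles_spec : Claim_equal_findNumberOfTriangles := by
  intro arr n _hdom hpre
  unfold Spec_findNumberOfTriangles findNumberOfTriangles findNumberOfTriangles_alt
  simp only []
  set l := PySem.List.sorted arr (fun x => x) false with hl
  have hlenl : (l.length : Int) = (arr.length : Int) := by
    rw [hl, PySem.List.length_sorted]
  by_cases hn : n ≤ 2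
  · -- both loops are empty
    rw [PySem.List.pyRange_neg_one_eq_nil (by omega),
        PySem.List.pyRange_one_eq_nil (by omega)]
    simp
  · -- the real case: 3 ≤ n and (by Pre_) n ≤ len arr
    have hnlen : n ≤ (l.length : Int) := by
      rcases hpre with h | h
      · omega
      · omega
    -- A as a sum
    have hA : (PySem.List.pyRange (n - 1) 1 (-1)).foldl
        (fun count c => pvTwoPtr l (PySem.List.pyGetD l c 0) 0 (c - 1) count) 0 =
        ∑ c ∈ Finset.Ico 2 n, pvT l (pvVal l c) 0 (c - 1) := by
      rw [pvFoldl_add _ _ (fun c => pvT l (pvVal l c) 0 (c - 1))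
            (by
              intro acc c hc
              rw [PySem.List.mem_pyRange_neg_one] at hc
              exact pvTwoPtr_spec arr (PySem.List.pyGetD l c 0) 0 (c - 1) acc le_rfl (by rw [← hl]; omega))]
      rw [PySem.List.pyRange_neg_one_eq_reverse, List.map_reverse, List.sum_reverse]
      rw [show (1 : Int) + 1 = 2 from rfl, show n - 1 + 1 = n by omega]
      rw [pvSum_pyRange]
      simp [pvVal]
    rw [hA]
    -- extend the apex range from [2, n) to [0, n)
    have hext : (∑ c ∈ Finset.Ico 2 n, pvT l (pvVal l c) 0 (c - 1)) =
        ∑ c ∈ Finset.Ico 0 n, pvT l (pvVal l c) 0 (c - 1) := by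
      rw [← pvSum_Ico_split (fun c => pvT l (pvVal l c) 0 (c - 1))
            (show (0 : Int) ≤ 2 by omega) (show (2 : Int) ≤ n by omega)]
      have h02 : (∑ c ∈ Finset.Ico (0 : Int) 2, pvT l (pvVal l c) 0 (c - 1)) = 0 := by
        apply Finset.sum_eq_zero
        intro c hc
        simp only [Finset.mem_Ico] at hc
        exact pvT_eq_zero l _ 0 (c - 1) (by omega)
      rw [h02, zero_add]
    rw [hext]
    -- B as a sum over its own (guarded) pair ranges
    have hB : (PySem.List.pyRange 0 (n - 2) 1).foldl
        (fun count i =>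
          (PySem.List.pyRange (i + 1) (n - 1) 1).foldl
            (fun count j =>
              count + (pvLowerBound l (PySem.List.pyGetD l i 0 + PySem.List.pyGetD l j 0)
                (j + 1) n - (j + 1))) count) 0 =
        ∑ i ∈ Finset.Ico 0 (n - 2), ∑ j ∈ Finset.Ico (i + 1) (n - 1), ∑ k ∈ Finset.Ico (j + 1) n,
          (if pvVal l k < pvVal l i + pvVal l j then (1 : Int) else 0) := by
      rw [pvFoldl_add _ _
            (fun i => ∑ j ∈ Finset.Ico (i + 1) (n - 1), ∑ k ∈ Finset.Ico (j + 1) n,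
              (if pvVal l k < pvVal l i + pvVal l j then (1 : Int) else 0))
            (by
              intro acc i hi
              rw [PySem.List.mem_pyRange_one] at hi
              rw [pvFoldl_add _ _
                    (fun j => ∑ k ∈ Finset.Ico (j + 1) n,
                      (if pvVal l k < pvVal l i + pvVal l j then (1 : Int) else 0))
                    (by
                      intro acc2 j hj
                      rw [PySem.List.mem_pyRange_one] at hj
                      rw [pvLowerBound_spec arr
                            (PySem.List.pyGetD l i 0 + PySem.List.pyGetD l j 0)
                            (j + 1) n (by omega) (by rw [← hl]; omega), ← hl]
                      simp only [pvVal]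
                      abel)]
              rw [pvSum_pyRange])]
      rw [pvSum_pyRange, zero_add]
    rw [hB]
    -- widen B's guarded ranges to the full triangle [0,n) × (i,n): the added terms are 0
    have hwide : (∑ i ∈ Finset.Ico (0 : Int) (n - 2), ∑ j ∈ Finset.Ico (i + 1) (n - 1),
          ∑ k ∈ Finset.Ico (j + 1) n,
            (if pvVal l k < pvVal l i + pvVal l j then (1 : Int) else 0)) =
        ∑ i ∈ Finset.Ico (0 : Int) n, ∑ j ∈ Finset.Ico (i + 1) n, ∑ k ∈ Finset.Ico (j + 1) n,
          (if pvVal l k < pvVal l i + pvVal l j then (1 : Int) else 0) := by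
      have hinner : ∀ i ∈ Finset.Ico (0 : Int) (n - 2),
          (∑ j ∈ Finset.Ico (i + 1) (n - 1), ∑ k ∈ Finset.Ico (j + 1) n,
            (if pvVal l k < pvVal l i + pvVal l j then (1 : Int) else 0)) =
          ∑ j ∈ Finset.Ico (i + 1) n, ∑ k ∈ Finset.Ico (j + 1) n,
            (if pvVal l k < pvVal l i + pvVal l j then (1 : Int) else 0) := by
        intro i hi
        simp only [Finset.mem_Ico] at hi
        have := pvSum_Ico_succ_top (i + 1) (n - 1) (by omega)
          (fun j => ∑ k ∈ Finset.Ico (j + 1) n,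
            (if pvVal l k < pvVal l i + pvVal l j then (1 : Int) else 0))
        rw [show n - 1 + 1 = n by omega] at this
        rw [this, Finset.Ico_self, Finset.sum_empty, add_zero]
      rw [Finset.sum_congr rfl hinner]
      have h1 := pvSum_Ico_succ_top (0 : Int) (n - 1) (by omega)
        (fun i => ∑ j ∈ Finset.Ico (i + 1) n, ∑ k ∈ Finset.Ico (j + 1) n,
          (if pvVal l k < pvVal l i + pvVal l j then (1 : Int) else 0))
      rw [show n - 1 + 1 = n by omega] at h1
      have h2 := pvSum_Ico_succ_top (0 : Int) (n - 2) (by omega)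
        (fun i => ∑ j ∈ Finset.Ico (i + 1) n, ∑ k ∈ Finset.Ico (j + 1) n,
          (if pvVal l k < pvVal l i + pvVal l j then (1 : Int) else 0))
      rw [show n - 2 + 1 = n - 1 by omega] at h2
      rw [h1, h2]
      have hz1 : (∑ j ∈ Finset.Ico (n - 1) n, ∑ k ∈ Finset.Ico (j + 1) n,
          (if pvVal l k < pvVal l (n - 2) + pvVal l j then (1 : Int) else 0)) = 0 := by
        apply Finset.sum_eq_zero
        intro j hj
        simp only [Finset.mem_Ico] at hj
        rw [Finset.Ico_eq_empty (by omega), Finset.sum_empty]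
      have hz2 : (∑ j ∈ Finset.Ico n n, ∑ k ∈ Finset.Ico (j + 1) n,
          (if pvVal l k < pvVal l (n - 1) + pvVal l j then (1 : Int) else 0)) = 0 := by
        rw [Finset.Ico_self, Finset.sum_empty]
      simp only [hz1, hz2, add_zero]
    rw [hwide]
    -- rewrite each pvT as the explicit double sum over [0, c)
    have hT : ∀ c ∈ Finset.Ico (0 : Int) n,
        pvT l (pvVal l c) 0 (c - 1) =
          ∑ y ∈ Finset.Ico (0 : Int) c, ∑ x ∈ Finset.Ico (0 : Int) y,
            (if pvVal l c < pvVal l x + pvVal l y then (1 : Int) else 0) := by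
      intro c _
      unfold pvT
      rw [show c - 1 + 1 = c by omega]
    rw [Finset.sum_congr rfl hT]
    -- triple swap
    rw [pvSum_tri_comm 0 n
          (fun y c => ∑ x ∈ Finset.Ico (0 : Int) y,
            (if pvVal l c < pvVal l x + pvVal l y then (1 : Int) else 0))]
    have hswap : ∀ y ∈ Finset.Ico (0 : Int) n,
        (∑ c ∈ Finset.Ico (y + 1) n, ∑ x ∈ Finset.Ico (0 : Int) y,
          (if pvVal l c < pvVal l x + pvVal l y then (1 : Int) else 0)) =
        ∑ x ∈ Finset.Ico (0 : Int) y, ∑ c ∈ Finset.Ico (y + 1) n,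
          (if pvVal l c < pvVal l x + pvVal l y then (1 : Int) else 0) := by
      intro y _
      exact Finset.sum_comm
    rw [Finset.sum_congr rfl hswap]
    rw [pvSum_tri_comm 0 n
          (fun x y => ∑ c ∈ Finset.Ico (y + 1) n,
            (if pvVal l c < pvVal l x + pvVal l y then (1 : Int) else 0))]
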